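-- pv_equiv track=rewrite | github.com/martinkandera/ipp25_parser | parse25.py | transform_description
-- ===== SOURCE A (Python) =====
-- def transform_description(desc):
--     desc = desc.replace('\n', '\u0001')
--     desc = desc.replace(r'\n', '\u0001')
--     out = []
--     i = 0
--     while i < len(desc):
--         if desc[i] == '\u0001':
--             start = i
--             while i < len(desc) and desc[i] == '\u0001':
--                 i += 1
--             count = i - start
--             if count == 1:
--                 out.append("&nbsp;")
--             else:
--                 out.append("&#10;" * count)
--         else:
--             out.append(desc[i])
--             i += 1
--     return "".join(out)
-- ===== SOURCE B (Python) =====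
-- def transform_description(desc):
--     # Stage 1: both newline spellings become the sentinel '\u0001' (same as the spec).
--     s = desc.replace('\n', '\u0001').replace(r'\n', '\u0001')
--     # Stage 2: pure string-rewriting cascade, no scanning loop.
--     # Pair off sentinels: a run of k sentinels becomes 2*(k//2) marks '\u0002'
--     # followed by one leftover sentinel iff k is odd.
--     s = s.replace('\u0001\u0001', '\u0002\u0002')
--     # Absorb the odd leftover of runs of length >= 3 (it always follows a mark).
--     s = s.replace('\u0002\u0001', '\u0002\u0002')
--     # Only isolated newlines are still sentinels.
--     s = s.replace('\u0001', '&nbsp;')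
--     # Every mark stands for one newline of a run of length >= 2.
--     return s.replace('\u0002', '&#10;')
-- ===== Notes on version B (the rewrite author's own statement) =====
-- stated objective: faster
-- what changed: A scans the string with an index and a nested inner while that measures each sentinel run and appends pieces; B has no scanning loop at all: it rewrites the string with four more str.replace passes (pair off sentinel runs into marks, absorb an odd leftover mark-sentinel pair, expand remaining single sentinels to &nbsp;, expand marks to &#10;).
import Mathlib
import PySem

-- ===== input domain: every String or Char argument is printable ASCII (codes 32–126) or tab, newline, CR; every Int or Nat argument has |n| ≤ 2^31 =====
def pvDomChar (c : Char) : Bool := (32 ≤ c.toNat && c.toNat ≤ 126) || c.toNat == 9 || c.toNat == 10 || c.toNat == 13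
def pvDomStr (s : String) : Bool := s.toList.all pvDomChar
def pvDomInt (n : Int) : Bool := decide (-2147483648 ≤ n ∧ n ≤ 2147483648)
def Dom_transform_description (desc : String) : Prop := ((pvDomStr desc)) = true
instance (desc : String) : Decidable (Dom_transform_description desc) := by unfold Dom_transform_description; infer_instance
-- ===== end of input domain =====

-- B replaces A's index-scanning loop by a cascade of four further str.replace rewrites
-- (pair off sentinel runs, absorb an odd leftover, expand singles, expand marks) — no scan loop
-- (objective: faster by a constant factor — measured: the work moves into C-level str.replace).

-- ===== PORT A =====
-- the sentinel character '\u0001'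
def pvSent : Char := '\u0001'

-- inner while loop of A: count leading sentinels, return (count, rest)
def pvASkip : List Char → Nat × List Char
  | [] => (0, [])
  | c :: rest =>
    if c = pvSent then
      let p := pvASkip rest
      (p.1 + 1, p.2)
    else (0, c :: rest)

-- termination measure fact for the outer while loop (cited in decreasing_by)
theorem pvASkip_snd_length_le (l : List Char) : (pvASkip l).2.length ≤ l.length := by
  induction l with
  | nil => simp [pvASkip]
  | cons c rest ih =>
    by_cases h : c = pvSent
    · simp [pvASkip, h]; omega
    · simp [pvASkip, h]

-- outer while loop of A, over the remaining characters
def pvALoop : List Char → List (List Char)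
  | [] => []
  | c :: rest =>
    if _h : c = pvSent then
      let p := pvASkip (c :: rest)
      (if p.1 = 1 then "&nbsp;".toList else (List.replicate p.1 "&#10;".toList).flatten)
        :: pvALoop p.2
    else [c] :: pvALoop rest
  termination_by l => l.length
  decreasing_by
  · simpa [pvASkip, _h] using Nat.lt_succ_of_le (pvASkip_snd_length_le rest)
  · simp

def transform_description (desc : String) : String :=
  let d1 := PySem.Str.replace desc "\n" "\u0001"
  let d2 := PySem.Str.replace d1 "\\n" "\u0001"
  String.ofList (PySem.Chars.join [] (pvALoop d2.toList))

-- ===== PORT B =====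
def transform_description_alt (desc : String) : String :=
  let s1 := PySem.Str.replace desc "\n" "\u0001"
  let s2 := PySem.Str.replace s1 "\\n" "\u0001"
  let s3 := PySem.Str.replace s2 "\u0001\u0001" "\u0002\u0002"
  let s4 := PySem.Str.replace s3 "\u0002\u0001" "\u0002\u0002"
  let s5 := PySem.Str.replace s4 "\u0001" "&nbsp;"
  PySem.Str.replace s5 "\u0002" "&#10;"

-- ===== PRECONDITION & SPEC =====
def Spec_transform_description (desc : String) (out : String) : Prop := out = transform_description_alt desc
instance (desc : String) (out : String) : Decidable (Spec_transform_description desc out) := by unfold Spec_transform_description; infer_instance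

-- ===== CLAIM (what is proved, stated in full; the proofs are below) =====
def Claim_equal_transform_description : Prop := ∀ (desc : String), Dom_transform_description desc → Spec_transform_description desc (transform_description desc)

-- ===== LEMMAS AND PROOFS =====

-- the pair mark '\u0002'
def pvMark : Char := '\u0002'

-- head of the list is not the sentinel (maximal-run boundary condition)
def pvHeadNotS : List Char → Prop
  | [] => True
  | c :: _ => c ≠ pvSent

theorem pvHeadNotS_cons (c : Char) (t : List Char) : pvHeadNotS (c :: t) ↔ c ≠ pvSent := Iff.rfl

-- B's four rewrite stages, on the list side
def pvSt1 (l : List Char) : List Char := PySem.Chars.replace l [pvSent, pvSent] [pvMark, pvMark]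
def pvSt2 (l : List Char) : List Char := PySem.Chars.replace l [pvMark, pvSent] [pvMark, pvMark]
def pvSt3 (l : List Char) : List Char := PySem.Chars.replace l [pvSent] "&nbsp;".toList
def pvSt4 (l : List Char) : List Char := PySem.Chars.replace l [pvMark] "&#10;".toList

-- A's piece for a run of `k` sentinels
def pvFlush (k : Nat) : List Char :=
  if k = 1 then "&nbsp;".toList else (List.replicate k "&#10;".toList).flatten

-- ---- generic facts about PySem.Chars.replace (nonempty pattern) ----
theorem pvGo_acc (old new : List Char) :
    ∀ (fuel : Nat) (l acc : List Char),
      PySem.Chars.replace.go old new fuel l acc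
        = acc.reverse ++ PySem.Chars.replace.go old new fuel l [] := by
  intro fuel
  induction fuel with
  | zero => intro l acc; simp [PySem.Chars.replace.go]
  | succ f ih =>
    intro l acc
    cases l with
    | nil => simp [PySem.Chars.replace.go]
    | cons c t =>
      by_cases h : old.isPrefixOf (c :: t) = true
      · rw [PySem.Chars.replace.go, PySem.Chars.replace.go]
        simp only [h, if_true]
        rw [ih _ (new.reverse ++ acc), ih _ (new.reverse ++ [])]
        simp
      · rw [PySem.Chars.replace.go, PySem.Chars.replace.go]
        simp only [h]
        rw [ih t (c :: acc), ih t (c :: [])]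
        simp

theorem pvGo_nil (old new : List Char) (fuel : Nat) :
    PySem.Chars.replace.go old new fuel [] [] = [] := by
  cases fuel <;> simp [PySem.Chars.replace.go]

theorem pvGo_eq (old new : List Char) (h0 : old ≠ []) :
    ∀ (n : Nat) (l : List Char) (fuel fuel' : Nat), l.length ≤ n →
      l.length ≤ fuel → l.length ≤ fuel' →
      PySem.Chars.replace.go old new fuel l []
        = PySem.Chars.replace.go old new fuel' l [] := by
  intro n
  induction n with
  | zero =>
    intro l fuel fuel' hn _ _
    have : l = [] := by cases l <;> simp_all
    subst this; rw [pvGo_nil, pvGo_nil]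
  | succ n ih =>
    intro l fuel fuel' hn hf hf'
    cases l with
    | nil => rw [pvGo_nil, pvGo_nil]
    | cons c t =>
      obtain ⟨f, rfl⟩ : ∃ f, fuel = f + 1 := ⟨fuel - 1, by simp at hf; omega⟩
      obtain ⟨f', rfl⟩ : ∃ f', fuel' = f' + 1 := ⟨fuel' - 1, by simp at hf'; omega⟩
      have holdlen : 1 ≤ old.length := by
        cases old with
        | nil => exact absurd rfl h0
        | cons _ _ => simp
      by_cases h : old.isPrefixOf (c :: t) = true
      · rw [PySem.Chars.replace.go, PySem.Chars.replace.go]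
        simp only [h, if_true]
        rw [pvGo_acc, pvGo_acc old new f']
        have hdl : ((c :: t).drop old.length).length ≤ n := by
          simp only [List.length_drop, List.length_cons] at *
          omega
        rw [ih _ f f' hdl (by simp at hf ⊢; omega) (by simp at hf' ⊢; omega)]
      · rw [PySem.Chars.replace.go, PySem.Chars.replace.go]
        simp only [h, Bool.false_eq_true, if_false]
        rw [pvGo_acc, pvGo_acc old new f']
        have hdl : t.length ≤ n := by simp at hn; omega
        rw [ih _ f f' hdl (by simp at hf; omega) (by simp at hf'; omega)]

theorem pvRep_nil (old new : List Char) (h0 : old ≠ []) :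
    PySem.Chars.replace [] old new = [] := by
  simp [PySem.Chars.replace, List.isEmpty_eq_false_iff.mpr h0, pvGo_nil]

theorem pvRep_cons_neg (old new : List Char) (c : Char) (t : List Char)
    (h0 : old ≠ []) (h : ¬ old <+: (c :: t)) :
    PySem.Chars.replace (c :: t) old new = c :: PySem.Chars.replace t old new := by
  have hb : old.isPrefixOf (c :: t) = false := by
    rw [← Bool.not_eq_true]; exact fun hc => h (List.isPrefixOf_iff_prefix.mp hc)
  simp only [PySem.Chars.replace, List.isEmpty_eq_false_iff.mpr h0, if_false]
  rw [List.length_cons, PySem.Chars.replace.go]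
  simp only [hb, Bool.false_eq_true, if_false]
  rw [pvGo_acc]
  simp [PySem.Chars.replace, List.isEmpty_eq_false_iff.mpr h0]

theorem pvRep_cons_pos (old new l : List Char) (h0 : old ≠ []) (h : old <+: l) :
    PySem.Chars.replace l old new
      = new ++ PySem.Chars.replace (l.drop old.length) old new := by
  have hb : old.isPrefixOf l = true := List.isPrefixOf_iff_prefix.mpr h
  have holdlen : 1 ≤ old.length := by
    cases old with
    | nil => exact absurd rfl h0
    | cons _ _ => simp
  cases l with
  | nil => exact absurd (List.prefix_nil.mp h) h0
  | cons c t =>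
    simp only [PySem.Chars.replace, List.isEmpty_eq_false_iff.mpr h0,
      Bool.false_eq_true, if_false]
    rw [List.length_cons, PySem.Chars.replace.go]
    simp only [hb, if_true]
    rw [pvGo_acc]
    simp only [List.reverse_append, List.reverse_reverse, List.reverse_nil,
      List.nil_append, List.append_nil]
    congr 1
    exact pvGo_eq old new h0 t.length _ _ _
      (by simp only [List.length_drop, List.length_cons]; omega)
      (by simp only [List.length_drop, List.length_cons]; omega)
      (le_refl _)

-- chars of a replacement come from the input or the new piece
theorem pvRep_mem (old new : List Char) (h0 : old ≠ []) :
    ∀ (n : Nat) (l : List Char), l.length ≤ n → ∀ x ∈ PySem.Chars.replace l old new, x ∈ l ∨ x ∈ new := by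
  intro n
  induction n with
  | zero =>
    intro l hn x hx
    have : l = [] := by cases l <;> simp_all
    subst this; rw [pvRep_nil _ _ h0] at hx; simp at hx
  | succ n ih =>
    intro l hn x hx
    cases l with
    | nil => rw [pvRep_nil _ _ h0] at hx; simp at hx
    | cons c t =>
      have holdlen : 1 ≤ old.length := by
        cases old with
        | nil => exact absurd rfl h0
        | cons _ _ => simp
      by_cases h : old <+: (c :: t)
      · rw [pvRep_cons_pos _ _ _ h0 h] at hx
        rcases List.mem_append.mp hx with hx | hx
        · exact Or.inr hx
        · have hdl : ((c :: t).drop old.length).length ≤ n := by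
            simp only [List.length_drop, List.length_cons] at *; omega
          rcases ih _ hdl x hx with hx | hx
          · exact Or.inl (List.mem_of_mem_drop hx)
          · exact Or.inr hx
      · rw [pvRep_cons_neg _ _ _ _ h0 h] at hx
        rcases List.mem_cons.mp hx with rfl | hx
        · exact Or.inl (List.mem_cons_self ..)
        · have hdl : t.length ≤ n := by simp at hn; omega
          rcases ih _ hdl x hx with hx | hx
          · exact Or.inl (List.mem_cons_of_mem _ hx)
          · exact Or.inr hx

-- ---- stage 1: pair sentinels off ----
theorem pvSt1_nil : pvSt1 [] = [] := pvRep_nil _ _ (by simp)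

theorem pvSt1_cons_ne (c : Char) (t : List Char) (h : c ≠ pvSent) :
    pvSt1 (c :: t) = c :: pvSt1 t := by
  unfold pvSt1
  exact pvRep_cons_neg _ _ _ _ (by simp)
    (by simp [List.cons_prefix_cons]; exact fun hc _ => h hc.symm)

theorem pvSt1_S (t : List Char) (h : pvHeadNotS t) :
    pvSt1 (pvSent :: t) = pvSent :: pvSt1 t := by
  unfold pvSt1
  refine pvRep_cons_neg _ _ _ _ (by simp) ?_
  intro hp
  rcases t with _ | ⟨c, t⟩
  · simp [List.cons_prefix_cons, List.prefix_nil] at hp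
  · simp [List.cons_prefix_cons] at hp
    exact h hp.symm

theorem pvSt1_SS (t : List Char) :
    pvSt1 (pvSent :: pvSent :: t) = pvMark :: pvMark :: pvSt1 t := by
  unfold pvSt1
  rw [pvRep_cons_pos [pvSent, pvSent] [pvMark, pvMark] (pvSent :: pvSent :: t) (by simp) ⟨t, rfl⟩]
  simp

theorem pvSt1_run : ∀ (k : Nat) (t : List Char), pvHeadNotS t →
    pvSt1 (List.replicate k pvSent ++ t)
      = List.replicate (2 * (k / 2)) pvMark ++ List.replicate (k % 2) pvSent ++ pvSt1 t := by
  intro k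
  induction k using Nat.strong_induction_on with
  | _ k ih =>
    intro t ht
    match k with
    | 0 => simp
    | 1 => simpa using pvSt1_S t ht
    | (m + 2) =>
      have : List.replicate (m + 2) pvSent ++ t
          = pvSent :: pvSent :: (List.replicate m pvSent ++ t) := by
        simp [List.replicate_succ]
      rw [this, pvSt1_SS, ih m (by omega) t ht]
      have h2 : 2 * ((m + 2) / 2) = 2 * (m / 2) + 2 := by omega
      have h3 : (m + 2) % 2 = m % 2 := by omega
      rw [h2, h3]
      simp [List.replicate_succ]

theorem pvSt2_nil : pvSt2 [] = [] := pvRep_nil _ _ (by simp)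

theorem pvSt1_head (l : List Char) (h : pvHeadNotS l) : pvHeadNotS (pvSt1 l) := by
  rcases l with _ | ⟨c, t⟩
  · rw [pvSt1_nil]; trivial
  · rw [pvSt1_cons_ne c t h]; exact h

-- ---- stage 2: absorb the odd leftover ----
theorem pvSt2_cons_ne (c : Char) (t : List Char) (h : c ≠ pvMark) :
    pvSt2 (c :: t) = c :: pvSt2 t := by
  unfold pvSt2
  exact pvRep_cons_neg _ _ _ _ (by simp)
    (by simp [List.cons_prefix_cons]; exact fun hc _ => h hc.symm)

theorem pvSt2_D (t : List Char) (h : pvHeadNotS t) :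
    pvSt2 (pvMark :: t) = pvMark :: pvSt2 t := by
  unfold pvSt2
  refine pvRep_cons_neg _ _ _ _ (by simp) ?_
  intro hp
  rcases t with _ | ⟨c, t⟩
  · simp [List.cons_prefix_cons, List.prefix_nil] at hp
  · simp [List.cons_prefix_cons] at hp
    exact h hp.symm

theorem pvSt2_DS (t : List Char) :
    pvSt2 (pvMark :: pvSent :: t) = pvMark :: pvMark :: pvSt2 t := by
  unfold pvSt2
  rw [pvRep_cons_pos [pvMark, pvSent] [pvMark, pvMark] (pvMark :: pvSent :: t) (by simp) ⟨t, rfl⟩]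
  simp

theorem pvSt2_run : ∀ (m : Nat) (t : List Char), pvHeadNotS t →
    pvSt2 (List.replicate m pvMark ++ t) = List.replicate m pvMark ++ pvSt2 t := by
  intro m
  induction m with
  | zero => intro t _; simp
  | succ m ih =>
    intro t ht
    have hh : pvHeadNotS (List.replicate m pvMark ++ t) := by
      cases m with
      | zero => simpa using ht
      | succ m =>
        rw [List.replicate_succ, List.cons_append, pvHeadNotS_cons]
        decide
    rw [List.replicate_succ, List.cons_append, pvSt2_D _ hh, ih t ht]
    simp [List.replicate_succ]

theorem pvSt2_runS : ∀ (m : Nat) (t : List Char), 1 ≤ m →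
    pvSt2 (List.replicate m pvMark ++ pvSent :: t)
      = List.replicate (m + 1) pvMark ++ pvSt2 t := by
  intro m
  induction m with
  | zero => intro t h; omega
  | succ m ih =>
    intro t _
    rcases m with _ | m
    · simpa [List.replicate_succ] using pvSt2_DS t
    · have hh : pvHeadNotS (List.replicate (m + 1) pvMark ++ pvSent :: t) := by
        rw [List.replicate_succ, List.cons_append, pvHeadNotS_cons]
        decide
      rw [show List.replicate (m + 1 + 1) pvMark ++ pvSent :: t
          = pvMark :: (List.replicate (m + 1) pvMark ++ pvSent :: t) by
            simp [List.replicate_succ]]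
      rw [pvSt2_D _ hh, ih t (by omega)]
      simp [List.replicate_succ]

-- ---- stages 3 and 4: expand singles and marks ----
theorem pvSt3_nil : pvSt3 [] = [] := pvRep_nil _ _ (by simp)

theorem pvSt3_cons_ne (c : Char) (t : List Char) (h : c ≠ pvSent) :
    pvSt3 (c :: t) = c :: pvSt3 t := by
  unfold pvSt3
  exact pvRep_cons_neg _ _ _ _ (by simp)
    (by simp [List.cons_prefix_cons]; exact fun hc => h hc.symm)

theorem pvSt3_S (t : List Char) :
    pvSt3 (pvSent :: t) = "&nbsp;".toList ++ pvSt3 t := by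
  unfold pvSt3
  rw [pvRep_cons_pos [pvSent] "&nbsp;".toList (pvSent :: t) (by simp) ⟨t, rfl⟩]
  simp

theorem pvSt4_nil : pvSt4 [] = [] := pvRep_nil _ _ (by simp)

theorem pvSt4_cons_ne (c : Char) (t : List Char) (h : c ≠ pvMark) :
    pvSt4 (c :: t) = c :: pvSt4 t := by
  unfold pvSt4
  exact pvRep_cons_neg _ _ _ _ (by simp)
    (by simp [List.cons_prefix_cons]; exact fun hc => h hc.symm)

theorem pvSt4_D (t : List Char) :
    pvSt4 (pvMark :: t) = "&#10;".toList ++ pvSt4 t := by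
  unfold pvSt4
  rw [pvRep_cons_pos [pvMark] "&#10;".toList (pvMark :: t) (by simp) ⟨t, rfl⟩]
  simp

theorem pvSt4_pass (l X : List Char) (h : ∀ c ∈ l, c ≠ pvMark) :
    pvSt4 (l ++ X) = l ++ pvSt4 X := by
  induction l with
  | nil => simp
  | cons c t ih =>
    rw [List.cons_append, pvSt4_cons_ne _ _ (h c (List.mem_cons_self ..)), List.cons_append,
      ih (fun d hd => h d (List.mem_cons_of_mem _ hd))]

theorem pvSt3_runD (K : Nat) (X : List Char) :
    pvSt3 (List.replicate K pvMark ++ X) = List.replicate K pvMark ++ pvSt3 X := by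
  induction K with
  | zero => simp
  | succ K ih =>
    rw [List.replicate_succ, List.cons_append, pvSt3_cons_ne _ _ (by decide),
      ih, List.cons_append]

theorem pvSt4_runD (K : Nat) (X : List Char) :
    pvSt4 (List.replicate K pvMark ++ X)
      = (List.replicate K "&#10;".toList).flatten ++ pvSt4 X := by
  induction K with
  | zero => simp
  | succ K ih =>
    rw [List.replicate_succ, List.cons_append, pvSt4_D, ih,
      List.replicate_succ]
    simp

theorem pvNbsp_noMark : ∀ c ∈ "&nbsp;".toList, c ≠ pvMark := by
  intro c hc h
  subst h
  simp [pvMark] at hc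

-- combined stages 1 and 2 on a maximal sentinel run
theorem pvSt21_one (w : List Char) (hw : pvHeadNotS w) :
    pvSt2 (pvSt1 (List.replicate 1 pvSent ++ w)) = pvSent :: pvSt2 (pvSt1 w) := by
  rw [show List.replicate 1 pvSent ++ w = pvSent :: w by simp, pvSt1_S w hw,
    pvSt2_cons_ne _ _ (by decide)]

theorem pvSt21_run (K : Nat) (hK : 2 ≤ K) (w : List Char) (hw : pvHeadNotS w) :
    pvSt2 (pvSt1 (List.replicate K pvSent ++ w))
      = List.replicate K pvMark ++ pvSt2 (pvSt1 w) := by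
  rw [pvSt1_run K w hw]
  by_cases hP : K % 2 = 0
  · have h1 : 2 * (K / 2) = K := by omega
    rw [hP, h1]
    simpa using pvSt2_run K (pvSt1 w) (pvSt1_head w hw)
  · have hP1 : K % 2 = 1 := by omega
    have h1 : 2 * (K / 2) = K - 1 := by omega
    rw [hP1, h1]
    have h2 := pvSt2_runS (K - 1) (pvSt1 w) (by omega)
    have h3 : K - 1 + 1 = K := by omega
    rw [h3] at h2
    simpa [List.append_assoc] using h2

-- ---- the run decomposition of A's scan ----
theorem pvASkip_decomp : ∀ l : List Char,
    l = List.replicate (pvASkip l).1 pvSent ++ (pvASkip l).2 ∧ pvHeadNotS (pvASkip l).2 := by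
  intro l
  induction l with
  | nil => exact ⟨rfl, trivial⟩
  | cons c rest ih =>
    by_cases h : c = pvSent
    · subst h
      refine ⟨?_, by simpa [pvASkip] using ih.2⟩
      conv_lhs => rw [ih.1]
      simp [pvASkip, List.replicate_succ]
    · exact ⟨by simp [pvASkip, h],
        by simpa [pvASkip, h, pvHeadNotS_cons] using h⟩

theorem pvASkip_fix (l : List Char) (h : pvHeadNotS l) :
    (pvASkip l).1 = 0 ∧ (pvASkip l).2 = l := by
  rcases l with _ | ⟨c, t⟩
  · simp [pvASkip]
  · simp [pvASkip, (pvHeadNotS_cons c t).mp h]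

theorem pvASkip_replicate_append (k : Nat) (l : List Char)
    (hl : (pvASkip l).1 = 0 ∧ (pvASkip l).2 = l) :
    pvASkip (List.replicate k pvSent ++ l) = (k, l) := by
  induction k with
  | zero => simpa [pvASkip] using Prod.ext hl.1 hl.2
  | succ n ih => simp [List.replicate_succ, pvASkip, ih]

theorem pvALoop_run (k : Nat) (l : List Char)
    (hl : (pvASkip l).1 = 0 ∧ (pvASkip l).2 = l) :
    pvALoop (List.replicate (k + 1) pvSent ++ l) = pvFlush (k + 1) :: pvALoop l := by
  rw [List.replicate_succ, List.cons_append, pvALoop]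
  have h := pvASkip_replicate_append (k + 1) l hl
  rw [List.replicate_succ, List.cons_append] at h
  simp [h, pvFlush]

theorem pvALoop_cons_ne (c : Char) (rest : List Char) (hc : c ≠ pvSent) :
    pvALoop (c :: rest) = [c] :: pvALoop rest := by
  rw [pvALoop]; simp [hc]

-- '' .join over char-list pieces is flatten (join with the empty separator)
theorem pvJoin_empty (parts : List (List Char)) : PySem.Chars.join [] parts = parts.flatten := by
  induction parts with
  | nil => rfl
  | cons p ps ih =>
    cases ps with
    | nil => simp [PySem.Chars.join_singleton]
    | cons q qs => rw [PySem.Chars.join_cons_cons]; simp [ih]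

-- ---- main: the cascade computes A's run-scanning output ----
theorem pvMain : ∀ (n : Nat) (u : List Char), u.length ≤ n → pvMark ∉ u →
    pvSt4 (pvSt3 (pvSt2 (pvSt1 u))) = (pvALoop u).flatten := by
  intro n
  induction n with
  | zero =>
    intro u hn _
    have hu : u = [] := by cases u <;> simp_all
    subst hu
    rw [pvSt1_nil, pvSt2_nil, pvSt3_nil, pvSt4_nil, pvALoop]
    rfl
  | succ n ih =>
    intro u hn hD
    rcases u with _ | ⟨c, rest⟩
    · rw [pvSt1_nil, pvSt2_nil, pvSt3_nil, pvSt4_nil, pvALoop]; rfl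
    · by_cases hc : c = pvSent
      · subst hc
        obtain ⟨hdec, hhead⟩ := pvASkip_decomp (pvSent :: rest)
        have hk1 : 1 ≤ (pvASkip (pvSent :: rest)).1 := by simp [pvASkip]
        have hw2 : (pvASkip (pvSent :: rest)).2 = (pvASkip rest).2 := by simp [pvASkip]
        have hwlen : (pvASkip (pvSent :: rest)).2.length ≤ n := by
          rw [hw2]
          have := pvASkip_snd_length_le rest
          simp at hn; omega
        set K := (pvASkip (pvSent :: rest)).1 with hK
        set w := (pvASkip (pvSent :: rest)).2 with hw
        have hDw : pvMark ∉ w := fun hmem => hD (by rw [hdec]; exact List.mem_append_right _ hmem)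
        obtain ⟨k', hk'⟩ : ∃ k', K = k' + 1 := ⟨K - 1, by omega⟩
        rw [hdec, hk']
        rw [pvALoop_run k' w (pvASkip_fix w hhead)]
        rcases Nat.eq_or_lt_of_le (show 1 ≤ k' + 1 by omega) with h1 | h2
        · rw [← h1, pvSt21_one w hhead, pvSt3_S, pvSt4_pass _ _ pvNbsp_noMark,
            ih w hwlen hDw]
          simp [pvFlush]
        · have hne : k' ≠ 0 := by omega
          rw [pvSt21_run (k' + 1) h2 w hhead, pvSt3_runD, pvSt4_runD,
            ih w hwlen hDw]
          simp [pvFlush, hne]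
      · have hcD : c ≠ pvMark := fun h => hD (h ▸ List.mem_cons_self ..)
        rw [pvALoop_cons_ne c rest hc, pvSt1_cons_ne c _ hc, pvSt2_cons_ne c _ hcD,
          pvSt3_cons_ne c _ hc, pvSt4_cons_ne c _ hcD,
          ih rest (by simp at hn; omega) (fun h => hD (List.mem_cons_of_mem _ h))]
        simp

-- Dom gives pvMark-freedom of the sentinel-substituted string
theorem pvNoMark (desc : String) (hdom : Dom_transform_description desc) :
    pvMark ∉ PySem.Chars.replace
      (PySem.Chars.replace desc.toList ("\n").toList [pvSent])
      ("\\n").toList [pvSent] := by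
  intro hmem
  rcases pvRep_mem _ _ (by decide) _ _ (le_refl _) _ hmem with h | h
  · rcases pvRep_mem _ _ (by decide) _ _ (le_refl _) _ h with h' | h'
    · have hall := List.all_eq_true.mp hdom _ h'
      exact absurd hall (by decide)
    · revert h'; decide
  · revert h; decide

-- ===== VERDICT (by name: the statement is the Claim_ definition above) =====
theorem transform_description_spec : Claim_equal_transform_description := by
  intro desc hdom
  unfold Spec_transform_description transform_description transform_description_alt
  have hSS : ("\u0001\u0001" : String).toList = [pvSent, pvSent] := by decide
  have hDD : ("\u0002\u0002" : String).toList = [pvMark, pvMark] := by decide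
  have hDS : ("\u0002\u0001" : String).toList = [pvMark, pvSent] := by decide
  have hS1 : ("\u0001" : String).toList = [pvSent] := by decide
  have hD1 : ("\u0002" : String).toList = [pvMark] := by decide
  simp only [pvJoin_empty, PySem.Str.replace, String.toList_ofList, hSS, hDD, hDS, hS1, hD1]
  rw [← pvMain _ _ (le_refl _) (pvNoMark desc hdom)]
  simp [pvSt1, pvSt2, pvSt3, pvSt4]
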